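-- pv_equiv track=rewrite | github.com/Locke637/AVGM | common/common.py | find_neighbor_pos
-- ===== SOURCE A (Python) =====
-- def find_neighbor_pos(pos, view_field, num_neighbor):
--     # num_neighbor = 3
--     # view_field = 5
--     nei_index = {}
--     nei_pos = {}
--     for id, p in enumerate(pos):
--         nei_index[id] = []
--         nei_pos[id] = []
--         d_p_all = {}
--         temp_pos = {}
--         for index, nei_p in enumerate(pos):
--             d_x = abs(p[0] - nei_p[0])
--             d_y = abs(p[1] - nei_p[1])
--             if d_x < view_field and d_y < view_field and index != id:
--                 d_p = d_x + d_y
--                 d_p_all[index] = d_p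
--                 temp_pos[index] = [nei_p[0] - p[0], nei_p[1] - p[1]]
--         if d_p_all:
--             d_p_all = sorted(d_p_all.items(), key=lambda item: item[1])
--             count = 0
--             for idpos in d_p_all:
--                 if count < num_neighbor:
--                     nei_index[id].append(idpos[0])
--                     nei_pos[id].append(temp_pos[idpos[0]])
--                     count += 1
--                 else:
--                     break
--
--     return nei_index, nei_pos
-- ===== SOURCE B (Python) =====
-- def find_neighbor_pos(pos, view_field, num_neighbor):
--     # One pass per point: keep a bounded list `best` of at most num_neighbor
--     # candidates ordered by (distance, index), maintained by binary-search
--     # insertion; no per-point dicts and no full sort.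
--     nei_index = {}
--     nei_pos = {}
--     for id, p in enumerate(pos):
--         best = []  # triples (d, idx, rel) ordered by (d, idx), len <= num_neighbor
--         for idx, q in enumerate(pos):
--             if idx == id:
--                 continue
--             d_x = abs(p[0] - q[0])
--             d_y = abs(p[1] - q[1])
--             if d_x < view_field and d_y < view_field:
--                 d = d_x + d_y
--                 lo, hi = 0, len(best)
--                 while lo < hi:
--                     mid = (lo + hi) // 2
--                     if (best[mid][0], best[mid][1]) < (d, idx):
--                         lo = mid + 1
--                     else:
--                         hi = mid
--                 best.insert(lo, (d, idx, [q[0] - p[0], q[1] - p[1]]))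
--                 if len(best) > num_neighbor:
--                     best.pop()
--         nei_index[id] = [t[1] for t in best]
--         nei_pos[id] = [t[2] for t in best]
--     return nei_index, nei_pos
-- ===== Notes on version B (the rewrite author's own statement) =====
-- stated objective: alternative
-- what changed: Per point, A builds two index-keyed dicts, fully stable-sorts all candidates by distance and then walks them with a counter; B makes a single pass keeping a bounded list of at most num_neighbor (distance, index, relpos) triples ordered by (distance, index), inserted by hand-rolled binary search, so the per-point dicts and the full sort disappear.
import Mathlib
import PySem

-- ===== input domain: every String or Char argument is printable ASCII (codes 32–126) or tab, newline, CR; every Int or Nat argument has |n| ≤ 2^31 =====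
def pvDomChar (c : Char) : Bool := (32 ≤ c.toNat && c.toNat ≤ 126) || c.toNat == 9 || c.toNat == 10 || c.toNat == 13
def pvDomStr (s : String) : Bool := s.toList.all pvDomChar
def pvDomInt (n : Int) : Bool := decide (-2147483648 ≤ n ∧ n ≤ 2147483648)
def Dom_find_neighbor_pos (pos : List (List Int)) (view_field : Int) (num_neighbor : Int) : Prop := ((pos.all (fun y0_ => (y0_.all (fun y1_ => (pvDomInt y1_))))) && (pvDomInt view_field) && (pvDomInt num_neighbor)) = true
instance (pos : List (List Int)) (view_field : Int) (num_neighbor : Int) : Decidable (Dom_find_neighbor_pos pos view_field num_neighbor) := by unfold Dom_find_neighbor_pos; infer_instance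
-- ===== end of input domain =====

-- B replaces A's per-point dicts + full stable sort + count loop by a single pass that
-- maintains a bounded (distance, index)-ordered top-k list via binary-search insertion
-- (objective: alternative — a different selection algorithm of similar cost).

-- shared small arithmetic helpers (the same sub-expressions both Pythons write inline)
def pvDx (p q : List Int) : Int := |PySem.List.pyGetD p 0 0 - PySem.List.pyGetD q 0 0|
def pvDy (p q : List Int) : Int := |PySem.List.pyGetD p 1 0 - PySem.List.pyGetD q 1 0|
def pvRel (p q : List Int) : List Int :=
  [PySem.List.pyGetD q 0 0 - PySem.List.pyGetD p 0 0,
   PySem.List.pyGetD q 1 0 - PySem.List.pyGetD p 1 0]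

-- ===== PORT A =====
-- the condition of A's inner `if`
def pvCond (view_field : Int) (p : List Int) (id : Int) (iq : Int × List Int) : Bool :=
  decide (pvDx p iq.2 < view_field) && decide (pvDy p iq.2 < view_field) && decide (iq.1 ≠ id)

-- A's inner `for index, nei_p in enumerate(pos)` loop building d_p_all, temp_pos
def pvA_inner (pos : List (List Int)) (view_field : Int) (p : List Int) (id : Int) :
    PySem.Dict Int Int × PySem.Dict Int (List Int) :=
  (PySem.List.enumerate pos 0).foldl
    (fun st iq =>
      if pvCond view_field p id iq then
        (st.1.insert iq.1 (pvDx p iq.2 + pvDy p iq.2), st.2.insert iq.1 (pvRel p iq.2))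
      else st)
    (PySem.Dict.empty, PySem.Dict.empty)

-- A's count-bounded append loop over the sorted items (the `break` is the else-branch)
def pvA_take (num_neighbor : Int) (temp_pos : PySem.Dict Int (List Int)) :
    List (Int × Int) → Int → List Int → List (List Int) → List Int × List (List Int)
  | [], _, accI, accP => (accI, accP)
  | idpos :: rest, count, accI, accP =>
    if count < num_neighbor then
      pvA_take num_neighbor temp_pos rest (count + 1)
        (accI ++ [idpos.1]) (accP ++ [temp_pos.getD idpos.1 []])
    else (accI, accP)

-- `nei_index[id].append(...)` mutates the list stored at key id; modelled by overwriting
-- the (just created) entry with the appended list (insert overwrites in place).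
def find_neighbor_pos (pos : List (List Int)) (view_field : Int) (num_neighbor : Int) :
    (List (Int × List Int)) × (List (Int × List (List Int))) :=
  let r := (PySem.List.enumerate pos 0).foldl
    (fun st ip =>
      let ni := st.1.insert ip.1 ([] : List Int)
      let np := st.2.insert ip.1 ([] : List (List Int))
      let inner := pvA_inner pos view_field ip.2 ip.1
      if inner.1.items = [] then (ni, np)
      else
        let d_p_all := PySem.List.sorted inner.1.items (fun it => it.2) false
        let tk := pvA_take num_neighbor inner.2 d_p_all 0 [] []
        (ni.insert ip.1 tk.1, np.insert ip.1 tk.2))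
    (PySem.Dict.empty, PySem.Dict.empty)
  (r.1.items, r.2.items)

-- ===== PORT B =====
-- Source B's binary search `while lo < hi: mid = (lo+hi)//2; if (best[mid][0], best[mid][1]) < (d, idx): lo = mid+1 else: hi = mid`
-- (best[mid] is List.getD: the loop keeps 0 ≤ mid < hi ≤ len(best), where Python and getD agree)
def pvB_bisect (t : Int × Int × List Int) (l : List (Int × Int × List Int)) (lo hi : Nat) : Nat :=
  if lo < hi then
    if (l.getD ((lo + hi) / 2) t).1 < t.1
        ∨ ((l.getD ((lo + hi) / 2) t).1 = t.1 ∧ (l.getD ((lo + hi) / 2) t).2.1 < t.2.1) then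
      pvB_bisect t l ((lo + hi) / 2 + 1) hi
    else pvB_bisect t l lo ((lo + hi) / 2)
  else lo
termination_by hi - lo
decreasing_by all_goals omega

-- Source B's `best.insert(lo, (d, idx, rel))`
def pvB_ins (t : Int × Int × List Int) (l : List (Int × Int × List Int)) :
    List (Int × Int × List Int) :=
  PySem.List.insert l ((pvB_bisect t l 0 l.length : Nat) : Int) t

-- Source B's `if len(best) > num_neighbor: best.pop()`
def pvB_trunc (num_neighbor : Int) (l : List (Int × Int × List Int)) :
    List (Int × Int × List Int) :=
  if num_neighbor < (l.length : Int) then l.dropLast else l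

-- Source B's inner loop: bounded ordered top-k list of (d, idx, rel) triples
def pvB_best (pos : List (List Int)) (view_field num_neighbor id : Int) (p : List Int) :
    List (Int × Int × List Int) :=
  (PySem.List.enumerate pos 0).foldl
    (fun best iq =>
      if iq.1 = id then best
      else if pvDx p iq.2 < view_field ∧ pvDy p iq.2 < view_field then
        pvB_trunc num_neighbor (pvB_ins (pvDx p iq.2 + pvDy p iq.2, iq.1, pvRel p iq.2) best)
      else best)
    []

def find_neighbor_pos_alt (pos : List (List Int)) (view_field : Int) (num_neighbor : Int) :
    (List (Int × List Int)) × (List (Int × List (List Int))) :=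
  let r := (PySem.List.enumerate pos 0).foldl
    (fun st ip =>
      let best := pvB_best pos view_field num_neighbor ip.1 ip.2
      (st.1.insert ip.1 (best.map (fun t => t.2.1)),
       st.2.insert ip.1 (best.map (fun t => t.2.2))))
    (PySem.Dict.empty, PySem.Dict.empty)
  (r.1.items, r.2.items)

-- ===== PRECONDITION & SPEC =====
-- A indexes p[0], p[1] of every row; a row shorter than 2 raises IndexError (when pos ≠ []).
def Pre_find_neighbor_pos (pos : List (List Int)) (view_field : Int) (num_neighbor : Int) : Prop :=
  ∀ q ∈ pos, 2 ≤ q.length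
instance (pos : List (List Int)) (view_field : Int) (num_neighbor : Int) :
    Decidable (Pre_find_neighbor_pos pos view_field num_neighbor) := by
  unfold Pre_find_neighbor_pos; infer_instance

def pvWitness_find_neighbor_pos : List (List Int) × Int × Int :=
  ([[0, 0], [3, 1], [1, 1]], 5, 3)

def Spec_find_neighbor_pos (pos : List (List Int)) (view_field : Int) (num_neighbor : Int)
    (out : (List (Int × List Int)) × (List (Int × List (List Int)))) : Prop :=
  out = find_neighbor_pos_alt pos view_field num_neighbor
instance (pos : List (List Int)) (view_field : Int) (num_neighbor : Int)
    (out : (List (Int × List Int)) × (List (Int × List (List Int)))) :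
    Decidable (Spec_find_neighbor_pos pos view_field num_neighbor out) := by
  unfold Spec_find_neighbor_pos; infer_instance

-- ===== CLAIM (what is proved, stated in full; the proofs are below) =====
def Claim_equal_find_neighbor_pos : Prop := ∀ (pos : List (List Int)) (view_field : Int) (num_neighbor : Int), Dom_find_neighbor_pos pos view_field num_neighbor → Pre_find_neighbor_pos pos view_field num_neighbor → Spec_find_neighbor_pos pos view_field num_neighbor (find_neighbor_pos pos view_field num_neighbor)

-- ===== LEMMAS AND PROOFS =====

-- the filtered candidate list and the (d, idx, rel) triple of a candidate
def pvC (pos : List (List Int)) (view_field : Int) (p : List Int) (id : Int) :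
    List (Int × List Int) :=
  (PySem.List.enumerate pos 0).filter (pvCond view_field p id)

def pvTriple (p : List Int) (iq : Int × List Int) : Int × Int × List Int :=
  (pvDx p iq.2 + pvDy p iq.2, iq.1, pvRel p iq.2)

def pvPi (t : Int × Int × List Int) : Int × Int := (t.2.1, t.1)

-- the strict (distance, index) order and the plain front-scan insertion, used to
-- characterise what B's binary-search insertion computes on an ordered list
def pvKeyLt (a b : Int × Int × List Int) : Prop :=
  a.1 < b.1 ∨ (a.1 = b.1 ∧ a.2.1 < b.2.1)

def pvIns (t : Int × Int × List Int) : List (Int × Int × List Int) → List (Int × Int × List Int)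
  | [] => [t]
  | u :: rest =>
    if u.1 < t.1 ∨ (u.1 = t.1 ∧ u.2.1 < t.2.1) then u :: pvIns t rest
    else t :: u :: rest

lemma pvKeyLt_trans {a b c : Int × Int × List Int}
    (h1 : pvKeyLt a b) (h2 : pvKeyLt b c) : pvKeyLt a c := by
  unfold pvKeyLt at *
  omega

lemma pvIns_at (t : Int × Int × List Int) :
    ∀ (l : List (Int × Int × List Int)) (j : Nat), j ≤ l.length →
      (∀ i, i < j → pvKeyLt (l.getD i t) t) →
      (∀ _ : j < l.length, ¬ pvKeyLt (l.getD j t) t) →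
      l.take j ++ t :: l.drop j = pvIns t l
  | [], j, hj, _, _ => by
    have hj0 : j = 0 := by simpa using hj
    subst hj0
    simp [pvIns]
  | u :: rest, 0, _, _, h2 => by
    have hu : ¬ pvKeyLt u t := by simpa using h2 (by simp)
    simp only [pvIns, List.take_zero, List.drop_zero, List.nil_append]
    rw [if_neg (by simpa [pvKeyLt] using hu)]
  | u :: rest, j + 1, hj, h1, h2 => by
    have hu : pvKeyLt u t := by simpa using h1 0 (by omega)
    simp only [List.take_succ_cons, List.drop_succ_cons, List.cons_append, pvIns]
    rw [if_pos (by simpa [pvKeyLt] using hu)]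
    rw [pvIns_at t rest j (by simpa using hj)
      (fun i hi => by simpa using h1 (i + 1) (by omega))
      (fun h => by simpa using h2 (by simpa using h))]

lemma pvB_bisect_inv (t : Int × Int × List Int) (l : List (Int × Int × List Int))
    (hs : l.Pairwise pvKeyLt) :
    ∀ (n lo hi : Nat), hi - lo ≤ n → lo ≤ hi → hi ≤ l.length →
      (∀ i, i < lo → pvKeyLt (l.getD i t) t) →
      (∀ i, hi ≤ i → i < l.length → ¬ pvKeyLt (l.getD i t) t) →
      pvB_bisect t l lo hi ≤ l.length
        ∧ (∀ i, i < pvB_bisect t l lo hi → pvKeyLt (l.getD i t) t)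
        ∧ (∀ i, pvB_bisect t l lo hi ≤ i → i < l.length → ¬ pvKeyLt (l.getD i t) t) := by
  have hmono : ∀ (i j : Nat), i < j → j < l.length →
      pvKeyLt (l.getD i t) (l.getD j t) := by
    intro i j hij hj
    rw [List.getD_eq_getElem l t (by omega), List.getD_eq_getElem l t hj]
    exact List.pairwise_iff_getElem.mp hs i j (by omega) hj hij
  intro n
  induction n with
  | zero =>
    intro lo hi hn hlh hhl hlo hhi
    rw [pvB_bisect, if_neg (by omega)]
    exact ⟨by omega, fun i hi' => hlo i hi', fun i hi1 hi2 => hhi i (by omega) hi2⟩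
  | succ n ih =>
    intro lo hi hn hlh hhl hlo hhi
    by_cases hlt : lo < hi
    · rw [pvB_bisect, if_pos hlt]
      have hmlen : (lo + hi) / 2 < l.length := by omega
      split
      · next hc =>
        have hkey : pvKeyLt (l.getD ((lo + hi) / 2) t) t := hc
        refine ih ((lo + hi) / 2 + 1) hi (by omega) (by omega) hhl ?_ hhi
        intro i hi'
        by_cases hilo : i < lo
        · exact hlo i hilo
        · by_cases him : i = (lo + hi) / 2
          · exact him ▸ hkey
          · exact pvKeyLt_trans (hmono i ((lo + hi) / 2) (by omega) hmlen) hkey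
      · next hc =>
        have hkey : ¬ pvKeyLt (l.getD ((lo + hi) / 2) t) t := hc
        refine ih lo ((lo + hi) / 2) (by omega) (by omega) (by omega) hlo ?_
        intro i hi1 hi2
        by_cases him : i = (lo + hi) / 2
        · exact him ▸ hkey
        · exact fun habs =>
            hkey (pvKeyLt_trans (hmono ((lo + hi) / 2) i (by omega) hi2) habs)
    · rw [pvB_bisect, if_neg hlt]
      exact ⟨by omega, fun i hi' => hlo i hi', fun i hi1 hi2 => hhi i (by omega) hi2⟩

lemma pvB_ins_eq_pvIns (t : Int × Int × List Int) (l : List (Int × Int × List Int))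
    (hs : l.Pairwise pvKeyLt) : pvB_ins t l = pvIns t l := by
  obtain ⟨h1, h2, h3⟩ := pvB_bisect_inv t l hs l.length 0 l.length (by omega) (by omega)
    le_rfl (by omega) (fun i hi1 hi2 => by omega)
  unfold pvB_ins
  rw [PySem.List.insert_natCast l (pvB_bisect t l 0 l.length) t h1]
  exact pvIns_at t l (pvB_bisect t l 0 l.length) h1 (fun i hi => h2 i hi)
    (fun h => h3 _ le_rfl h)

-- unbounded lexicographic insertion sort of the triples
def pvS (ts : List (Int × Int × List Int)) : List (Int × Int × List Int) :=
  ts.foldl (fun acc t => pvIns t acc) []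

lemma pvC_fst_nodup (pos : List (List Int)) (vf : Int) (p : List Int) (id : Int) :
    ((pvC pos vf p id).map (fun iq => iq.1)).Nodup := by
  have h : (pvC pos vf p id).Pairwise (fun a b => a.1 < b.1) :=
    (PySem.List.pairwise_lt_enumerate pos 0).filter (pvCond vf p id)
  exact List.pairwise_map.mpr (h.imp fun hlt => ne_of_lt hlt)

lemma pvA_inner_items (pos : List (List Int)) (vf : Int) (p : List Int) (id : Int) :
    (pvA_inner pos vf p id).1.items
        = (pvC pos vf p id).map (fun iq => (iq.1, pvDx p iq.2 + pvDy p iq.2))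
      ∧ (pvA_inner pos vf p id).2.items
        = (pvC pos vf p id).map (fun iq => (iq.1, pvRel p iq.2)) := by
  have hsplit : pvA_inner pos vf p id
      = ((pvC pos vf p id).foldl
           (fun d iq => d.insert iq.1 (pvDx p iq.2 + pvDy p iq.2)) PySem.Dict.empty,
         (pvC pos vf p id).foldl
           (fun d iq => d.insert iq.1 (pvRel p iq.2)) PySem.Dict.empty) := by
    unfold pvA_inner pvC
    rw [List.foldl_filter, List.foldl_filter, ← PySem.List.foldl_prod_mk]
    congr 1
    funext st iq
    by_cases hc : pvCond vf p id iq <;> simp [hc]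
  rw [hsplit]
  constructor <;>
  · rw [PySem.Dict.items_foldl_insert_fresh _ _ _ _ (by intro a _; rfl)
        (pvC_fst_nodup pos vf p id)]
    simp [PySem.Dict.empty]

lemma pvA_temp_getD (pos : List (List Int)) (vf : Int) (p : List Int) (id : Int)
    (iq : Int × List Int) (h : iq ∈ pvC pos vf p id) :
    (pvA_inner pos vf p id).2.getD iq.1 [] = pvRel p iq.2 := by
  apply PySem.Dict.getD_of_mem_items
  · rw [(pvA_inner_items pos vf p id).2]
    exact List.mem_map.mpr ⟨iq, h, rfl⟩
  · show ((pvA_inner pos vf p id).2.items.map _).Nodup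
    rw [(pvA_inner_items pos vf p id).2, List.map_map]
    exact pvC_fst_nodup pos vf p id

lemma pvIns_mem {t u : Int × Int × List Int} {l : List (Int × Int × List Int)}
    (h : u ∈ pvIns t l) : u = t ∨ u ∈ l := by
  induction l with
  | nil => simpa [pvIns] using h
  | cons v vs ih =>
    simp only [pvIns] at h
    split at h
    · rcases List.mem_cons.mp h with h1 | h2
      · exact Or.inr (by simp [h1])
      · rcases ih h2 with h3 | h4
        · exact Or.inl h3
        · exact Or.inr (List.mem_cons_of_mem _ h4)
    · simpa using h

lemma pvS_mem_aux {u : Int × Int × List Int} :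
    ∀ (ts acc : List (Int × Int × List Int)),
      u ∈ ts.foldl (fun acc t => pvIns t acc) acc → u ∈ acc ∨ u ∈ ts
  | [], acc, h => Or.inl h
  | t :: ts, acc, h => by
    rcases pvS_mem_aux ts (pvIns t acc) h with h1 | h2
    · rcases pvIns_mem h1 with h3 | h4
      · exact Or.inr (by simp [h3])
      · exact Or.inl h4
    · exact Or.inr (List.mem_cons_of_mem _ h2)

lemma pvS_mem {ts : List (Int × Int × List Int)} {u : Int × Int × List Int}
    (h : u ∈ pvS ts) : u ∈ ts := by
  rcases pvS_mem_aux ts [] h with h1 | h2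
  · simp at h1
  · exact h2

lemma pvIns_map_pi (t : Int × Int × List Int) (acc : List (Int × Int × List Int))
    (h : ∀ u ∈ acc, u.2.1 < t.2.1) :
    (pvIns t acc).map pvPi
      = PySem.List.insertBy (fun a b => decide (a.2 < b.2)) (pvPi t) (acc.map pvPi) := by
  induction acc with
  | nil => simp [pvIns, PySem.List.insertBy]
  | cons u rest ih =>
    have hu : u.2.1 < t.2.1 := h u (by simp)
    simp only [pvIns, List.map_cons, PySem.List.insertBy]
    by_cases hc : u.1 < t.1 ∨ (u.1 = t.1 ∧ u.2.1 < t.2.1)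
    · have hnb : ¬ (pvPi t).2 < (pvPi u).2 := by
        simp only [pvPi]
        rcases hc with h1 | ⟨h1, _⟩ <;> omega
      rw [if_pos hc, if_neg (by simpa using hnb)]
      simp only [List.map_cons]
      rw [ih (fun v hv => h v (List.mem_cons_of_mem _ hv))]
    · have hb : t.1 < u.1 := by
        rcases lt_trichotomy t.1 u.1 with h3 | h3 | h3
        · exact h3
        · exact absurd (Or.inr ⟨h3.symm, hu⟩) hc
        · exact absurd (Or.inl h3) hc
      rw [if_neg hc, if_pos (by simp [pvPi, hb])]
      simp

lemma pvS_map_pi_aux :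
    ∀ (ts acc : List (Int × Int × List Int)),
      ts.Pairwise (fun a b => a.2.1 < b.2.1) →
      (∀ u ∈ acc, ∀ t ∈ ts, u.2.1 < t.2.1) →
      (ts.foldl (fun a t => pvIns t a) acc).map pvPi
        = (ts.map pvPi).foldl
            (fun acc x => PySem.List.insertBy (fun a b => decide (a.2 < b.2)) x acc)
            (acc.map pvPi)
  | [], _, _, _ => rfl
  | t :: ts, acc, hp, hacc => by
    simp only [List.foldl_cons, List.map_cons]
    rw [← pvIns_map_pi t acc (fun u hu => hacc u hu t (by simp))]
    exact pvS_map_pi_aux ts (pvIns t acc) (List.pairwise_cons.mp hp).2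
      (fun u hu t' ht' => by
        rcases pvIns_mem hu with h1 | h2
        · exact h1 ▸ (List.pairwise_cons.mp hp).1 t' ht'
        · exact hacc u h2 t' (List.mem_cons_of_mem _ ht'))

lemma pvS_map_pi (ts : List (Int × Int × List Int))
    (h : ts.Pairwise (fun a b => a.2.1 < b.2.1)) :
    (pvS ts).map pvPi
      = (ts.map pvPi).foldl
          (fun acc x => PySem.List.insertBy (fun a b => decide (a.2 < b.2)) x acc) [] := by
  exact pvS_map_pi_aux ts [] h (by simp)

lemma pvIns_length (t : Int × Int × List Int) (l : List (Int × Int × List Int)) :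
    (pvIns t l).length = l.length + 1 := by
  induction l with
  | nil => simp [pvIns]
  | cons u us ih => simp only [pvIns]; split <;> simp [ih]

lemma pvB_trunc_eq_take (k : Int) (l : List (Int × Int × List Int))
    (h : l.length ≤ k.toNat + 1) : pvB_trunc k l = l.take k.toNat := by
  unfold pvB_trunc
  split
  · rw [List.dropLast_eq_take]
    congr 1
    omega
  · exact (List.take_of_length_le (by omega)).symm

lemma pvIns_take (K : Nat) (m : List (Int × Int × List Int)) (t : Int × Int × List Int) :
    (pvIns t (m.take K)).take K = (pvIns t m).take K := by
  induction m generalizing K with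
  | nil => simp
  | cons u tl ih =>
    cases K with
    | zero => simp
    | succ K =>
      simp only [List.take_succ_cons, pvIns]
      by_cases hc : u.1 < t.1 ∨ (u.1 = t.1 ∧ u.2.1 < t.2.1)
      · simp only [if_pos hc, List.take_succ_cons, ih]
      · simp only [if_neg hc, List.take_succ_cons]
        congr 1
        cases K with
        | zero => simp
        | succ K' =>
          simp only [List.take_succ_cons, List.take_take]
          rw [Nat.min_eq_left (Nat.le_succ K')]

lemma pvB_fold_trunc (k : Int) (ts : List (Int × Int × List Int)) :
    ∀ m, ts.foldl (fun b t => pvB_trunc k (pvIns t b)) (m.take k.toNat)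
      = (ts.foldl (fun acc t => pvIns t acc) m).take k.toNat := by
  induction ts with
  | nil => intro m; rfl
  | cons t ts ih =>
    intro m
    simp only [List.foldl_cons]
    have h1 : pvB_trunc k (pvIns t (m.take k.toNat))
        = (pvIns t m).take k.toNat := by
      rw [pvB_trunc_eq_take]
      · exact pvIns_take k.toNat m t
      · rw [pvIns_length]
        have := List.length_take_le k.toNat m
        omega
    rw [h1]
    exact ih (pvIns t m)

lemma pvA_take_eq (k : Int) (temp : PySem.Dict Int (List Int)) :
    ∀ (l : List (Int × Int)) (count : Int) (accI : List Int) (accP : List (List Int)),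
      pvA_take k temp l count accI accP
        = (accI ++ (l.take (k - count).toNat).map (fun q => q.1),
           accP ++ (l.take (k - count).toNat).map (fun q => temp.getD q.1 [])) := by
  intro l
  induction l with
  | nil => intro count accI accP; simp [pvA_take]
  | cons q rest ih =>
    intro count accI accP
    by_cases hc : count < k
    · rw [pvA_take, if_pos hc, ih (count + 1)]
      have hn : (k - count).toNat = (k - (count + 1)).toNat + 1 := by omega
      rw [hn, List.take_succ_cons]
      simp
    · rw [pvA_take, if_neg hc]
      have hn : (k - count).toNat = 0 := by omega
      simp [hn]

lemma pvIns_pairwise (t : Int × Int × List Int) (l : List (Int × Int × List Int))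
    (hs : l.Pairwise pvKeyLt) (hidx : ∀ u ∈ l, u.2.1 < t.2.1) :
    (pvIns t l).Pairwise pvKeyLt := by
  induction l with
  | nil => simp [pvIns, List.pairwise_cons]
  | cons u rest ih =>
    obtain ⟨hu_rest, hrest⟩ := List.pairwise_cons.mp hs
    simp only [pvIns]
    by_cases hc : u.1 < t.1 ∨ (u.1 = t.1 ∧ u.2.1 < t.2.1)
    · rw [if_pos hc]
      refine List.pairwise_cons.mpr ⟨?_, ih hrest (fun v hv => hidx v (List.mem_cons_of_mem _ hv))⟩
      intro v hv
      rcases pvIns_mem hv with h1 | h2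
      · exact h1 ▸ hc
      · exact hu_rest v h2
    · rw [if_neg hc]
      have hut : u.2.1 < t.2.1 := hidx u (by simp)
      have htu : pvKeyLt t u := by unfold pvKeyLt; omega
      refine List.pairwise_cons.mpr ⟨?_, hs⟩
      intro v hv
      rcases List.mem_cons.mp hv with h1 | h2
      · exact h1 ▸ htu
      · exact pvKeyLt_trans htu (hu_rest v h2)

lemma pvB_trunc_pairwise (k : Int) (l : List (Int × Int × List Int))
    (hs : l.Pairwise pvKeyLt) : (pvB_trunc k l).Pairwise pvKeyLt := by
  unfold pvB_trunc
  split
  · exact hs.sublist (List.dropLast_sublist l)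
  · exact hs

lemma pvB_trunc_subset {k : Int} {l : List (Int × Int × List Int)}
    {u : Int × Int × List Int} (h : u ∈ pvB_trunc k l) : u ∈ l := by
  unfold pvB_trunc at h
  split at h
  · exact (List.dropLast_sublist l).subset h
  · exact h

lemma pvB_fold_eq (k : Int) :
    ∀ (ts acc : List (Int × Int × List Int)),
      ts.Pairwise (fun a b => a.2.1 < b.2.1) → acc.Pairwise pvKeyLt →
      (∀ u ∈ acc, ∀ t ∈ ts, u.2.1 < t.2.1) →
      ts.foldl (fun b t => pvB_trunc k (pvB_ins t b)) acc
        = ts.foldl (fun b t => pvB_trunc k (pvIns t b)) acc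
  | [], _, _, _, _ => rfl
  | t :: ts, acc, hp, hsrt, hbd => by
    simp only [List.foldl_cons]
    rw [pvB_ins_eq_pvIns t acc hsrt]
    have hins : (pvIns t acc).Pairwise pvKeyLt :=
      pvIns_pairwise t acc hsrt (fun u hu => hbd u hu t (by simp))
    exact pvB_fold_eq k ts (pvB_trunc k (pvIns t acc)) (List.pairwise_cons.mp hp).2
      (pvB_trunc_pairwise k _ hins)
      (fun u hu t' ht' => by
        rcases pvIns_mem (pvB_trunc_subset hu) with h1 | h2
        · exact h1 ▸ (List.pairwise_cons.mp hp).1 t' ht'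
        · exact hbd u h2 t' (List.mem_cons_of_mem _ ht'))

lemma pvB_best_eq (pos : List (List Int)) (vf k id : Int) (p : List Int) :
    pvB_best pos vf k id p
      = (pvS ((pvC pos vf p id).map (pvTriple p))).take k.toNat := by
  unfold pvB_best
  have hstep : (fun (best : List (Int × Int × List Int)) (iq : Int × List Int) =>
      if iq.1 = id then best
      else if pvDx p iq.2 < vf ∧ pvDy p iq.2 < vf then
        pvB_trunc k (pvB_ins (pvDx p iq.2 + pvDy p iq.2, iq.1, pvRel p iq.2) best)
      else best)
    = (fun best iq =>
        if pvCond vf p id iq = true then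
          pvB_trunc k (pvB_ins (pvTriple p iq) best) else best) := by
    funext best iq
    by_cases h1 : iq.1 = id
    · simp [pvCond, h1]
    · by_cases h2 : pvDx p iq.2 < vf ∧ pvDy p iq.2 < vf
      · simp [pvCond, h1, h2.1, h2.2, pvTriple]
      · rw [if_neg h1, if_neg h2, if_neg]
        simp only [pvCond, Bool.and_eq_true, decide_eq_true_eq]
        tauto
  rw [hstep, ← List.foldl_filter]
  show (pvC pos vf p id).foldl _ _ = _
  have hmap : (pvC pos vf p id).foldl
      (fun best iq => pvB_trunc k (pvB_ins (pvTriple p iq) best)) []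
      = ((pvC pos vf p id).map (pvTriple p)).foldl
          (fun b t => pvB_trunc k (pvB_ins t b)) [] := by
    rw [List.foldl_map]
  rw [hmap]
  have hpwT : ((pvC pos vf p id).map (pvTriple p)).Pairwise
      (fun a b => a.2.1 < b.2.1) := by
    rw [List.pairwise_map]
    exact (PySem.List.pairwise_lt_enumerate pos 0).filter _
  rw [pvB_fold_eq k _ [] hpwT List.Pairwise.nil (by simp)]
  have h := pvB_fold_trunc k ((pvC pos vf p id).map (pvTriple p)) []
  simpa using h

lemma pv_per_point (pos : List (List Int)) (vf k id : Int) (p : List Int) :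
    (if (pvA_inner pos vf p id).1.items = [] then (([] : List Int), ([] : List (List Int)))
     else pvA_take k (pvA_inner pos vf p id).2
            (PySem.List.sorted (pvA_inner pos vf p id).1.items (fun it => it.2) false) 0 [] [])
      = ((pvB_best pos vf k id p).map (fun t => t.2.1),
         (pvB_best pos vf k id p).map (fun t => t.2.2)) := by
  have hitems := pvA_inner_items pos vf p id
  rw [pvB_best_eq]
  by_cases hE : pvC pos vf p id = []
  · rw [if_pos (by rw [hitems.1, hE]; rfl)]
    simp [hE, pvS]
  · rw [if_neg (by rw [hitems.1]; simpa using hE)]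
    rw [pvA_take_eq]
    have hpairs : (pvA_inner pos vf p id).1.items
        = ((pvC pos vf p id).map (pvTriple p)).map pvPi := by
      rw [hitems.1, List.map_map]; rfl
    have hpw : ((pvC pos vf p id).map (pvTriple p)).Pairwise
        (fun a b => a.2.1 < b.2.1) := by
      rw [List.pairwise_map]
      exact (PySem.List.pairwise_lt_enumerate pos 0).filter _
    have hsorted : PySem.List.sorted (pvA_inner pos vf p id).1.items
          (fun it => it.2) false
        = (pvS ((pvC pos vf p id).map (pvTriple p))).map pvPi := by
      rw [hpairs, PySem.List.sorted_eq_foldl_insertBy,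
        pvS_map_pi _ hpw]
    rw [hsorted]
    simp only [Int.sub_zero, List.nil_append, Prod.mk.injEq]
    constructor
    · rw [← List.map_take, List.map_map]
      rfl
    · rw [← List.map_take, List.map_map]
      apply List.map_congr_left
      intro t ht
      have htS : t ∈ pvS ((pvC pos vf p id).map (pvTriple p)) :=
        List.mem_of_mem_take ht
      rcases List.mem_map.mp (pvS_mem htS) with ⟨iq, hiq, rfl⟩
      exact pvA_temp_getD pos vf p id iq hiq

-- ===== VERDICT (by name: the statement is the Claim_ definition above) =====
theorem find_neighbor_pos_spec : Claim_equal_find_neighbor_pos := by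
  intro pos vf k _ _
  unfold Spec_find_neighbor_pos find_neighbor_pos find_neighbor_pos_alt
  refine congrArg (fun r : PySem.Dict Int (List Int) × PySem.Dict Int (List (List Int)) => (r.1.items, r.2.items)) ?_
  apply List.foldl_ext
  intro st ip _
  dsimp only
  have hpp := pv_per_point pos vf k ip.1 ip.2
  by_cases hE : (pvA_inner pos vf ip.2 ip.1).1.items = []
  · rw [if_pos hE] at hpp ⊢
    have h1 := congrArg Prod.fst hpp
    have h2 := congrArg Prod.snd hpp
    dsimp only at h1 h2
    rw [← h1, ← h2]
  · rw [if_neg hE] at hpp ⊢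
    have h1 := congrArg Prod.fst hpp
    have h2 := congrArg Prod.snd hpp
    dsimp only at h1 h2
    rw [PySem.Dict.insert_insert_self, PySem.Dict.insert_insert_self, h1, h2]
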